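-- pv_equiv track=rewrite | github.com/gaurav150/DSA | PRACTICE PATTERNS/Hollow_square.py | generate_hollow_square
-- ===== SOURCE A (Python) =====
-- def generate_hollow_square(n):
--     """
--     Function to return a hollow square pattern of '*' of side n as a list of strings.
--
--     Parameters:
--     n (int): The size of the square.
--
--     Returns:
--     list: A list of strings where each string represents a row of the hollow square.
--     """
--     lst = []
--     for i in range(n):
--         if i == 0 or i == n - 1:
--             lst.append('*' * n)
--         else:
--             lst.append('*' + ' ' * (n - 2) + '*')
--     return lst
-- ===== SOURCE B (Python) =====
-- def generate_hollow_square(n):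
--     if n <= 0:
--         return []
--     grid = [[' '] * n for _ in range(n)]
--     grid[0] = ['*'] * n
--     grid[n - 1] = ['*'] * n
--     for row in grid:
--         row[0] = '*'
--         row[n - 1] = '*'
--     return [''.join(row) for row in grid]
-- ===== Notes on version B (the rewrite author's own statement) =====
-- stated objective: alternative
-- what changed: Replaces A's per-row two-case string formula by a paint-on-canvas algorithm: a mutable n x n grid of spaces is created, the top and bottom rows and the left and right columns are painted with '*', and the rows are joined at the end.
import Mathlib
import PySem

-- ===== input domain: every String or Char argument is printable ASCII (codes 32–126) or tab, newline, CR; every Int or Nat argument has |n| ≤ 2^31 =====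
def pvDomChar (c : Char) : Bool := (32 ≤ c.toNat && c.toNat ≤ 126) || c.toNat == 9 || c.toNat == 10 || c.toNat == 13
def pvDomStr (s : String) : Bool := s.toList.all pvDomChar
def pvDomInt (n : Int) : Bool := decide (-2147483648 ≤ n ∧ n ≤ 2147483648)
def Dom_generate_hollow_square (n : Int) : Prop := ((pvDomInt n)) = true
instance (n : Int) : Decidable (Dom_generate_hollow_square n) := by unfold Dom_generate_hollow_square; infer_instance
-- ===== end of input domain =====

-- B paints a mutable n x n canvas of spaces on its four border sides and joins the rows, instead of A's per-row two-case string formula.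


-- ===== PORT A =====
-- for i in range(n): append '*'*n on border rows, else '*' + ' '*(n-2) + '*'
def generate_hollow_square (n : Int) : List String :=
  (PySem.List.pyRange 0 n 1).foldl (fun lst i =>
    if i = 0 ∨ i = n - 1 then
      lst ++ [String.ofList (PySem.List.pyRepeat ['*'] n)]
    else
      lst ++ [String.ofList (['*'] ++ PySem.List.pyRepeat [' '] (n - 2) ++ ['*'])]) []

-- ===== PORT B =====
-- blank n x n grid; paint top and bottom rows, then the two side columns of every row; join
def generate_hollow_square_alt (n : Int) : List String :=
  if n ≤ 0 then []
  else
    let grid0 := (PySem.List.pyRange 0 n 1).map (fun _ => PySem.List.pyRepeat [' '] n)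
    let grid1 := PySem.List.pySetD grid0 0 (PySem.List.pyRepeat ['*'] n)
    let grid2 := PySem.List.pySetD grid1 (n - 1) (PySem.List.pyRepeat ['*'] n)
    let grid3 := grid2.map (fun row => PySem.List.pySetD (PySem.List.pySetD row 0 '*') (n - 1) '*')
    grid3.map String.ofList

-- ===== PRECONDITION & SPEC =====
def Spec_generate_hollow_square (n : Int) (out : List String) : Prop := out = generate_hollow_square_alt n
instance (n : Int) (out : List String) : Decidable (Spec_generate_hollow_square n out) := by unfold Spec_generate_hollow_square; infer_instance

-- ===== CLAIM =====
def Claim_equal_generate_hollow_square : Prop := ∀ (n : Int), Dom_generate_hollow_square n → Spec_generate_hollow_square n (generate_hollow_square n)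

-- ===== LEMMAS AND PROOFS =====

-- setting the last cell of a replicated row
lemma set_replicate_last {α : Type} (a b : α) (k : Nat) :
    (List.replicate (k + 1) a).set k b = List.replicate k a ++ [b] := by
  induction k with
  | zero => rfl
  | succ k ih =>
      rw [List.replicate_succ, List.set_cons_succ, ih]
      simp [List.replicate_succ]

-- painting both side cells of a blank row gives A's interior row (n ≥ 2)
lemma painted_row_eq (n : Int) (hn : 2 ≤ n) :
    PySem.List.pySetD (PySem.List.pySetD (PySem.List.pyRepeat [' '] n) 0 '*') (n - 1) '*'
      = ['*'] ++ PySem.List.pyRepeat [' '] (n - 2) ++ ['*'] := by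
  rw [PySem.List.pyRepeat_singleton, PySem.List.pyRepeat_singleton,
      PySem.List.pySetD_of_nonneg _ '*' (by omega : (0:Int) ≤ n - 1),
      PySem.List.pySetD_of_nonneg _ '*' (by omega : (0:Int) ≤ 0)]
  obtain ⟨k, hk⟩ : ∃ k : Nat, n.toNat = k + 2 := ⟨n.toNat - 2, by omega⟩
  have h1 : (0 : Int).toNat = 0 := rfl
  have h2 : (n - 1).toNat = k + 1 := by omega
  have h3 : (n - 2).toNat = k := by omega
  rw [h1, h2, h3, hk, List.replicate_succ, List.set_cons_zero, List.set_cons_succ,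
      set_replicate_last]
  simp

-- painting the side cells of a star row changes nothing (n ≥ 1)
lemma painted_stars_eq (n : Int) (hn : 1 ≤ n) :
    PySem.List.pySetD (PySem.List.pySetD (PySem.List.pyRepeat ['*'] n) 0 '*') (n - 1) '*'
      = PySem.List.pyRepeat ['*'] n := by
  rw [PySem.List.pyRepeat_singleton,
      PySem.List.pySetD_of_nonneg _ '*' (by omega : (0:Int) ≤ 0),
      List.set_replicate_self,
      PySem.List.pySetD_of_nonneg _ '*' (by omega : (0:Int) ≤ n - 1),
      List.set_replicate_self]

theorem generate_hollow_square_eq_alt (n : Int) :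
    generate_hollow_square n = generate_hollow_square_alt n := by
  unfold generate_hollow_square generate_hollow_square_alt
  by_cases hle : n ≤ 0
  · simp [hle, PySem.List.pyRange_one_eq_nil hle]
  · have hn : 1 ≤ n := by omega
    simp only [if_neg hle]
    -- A's fold is the map of the branch over the row indices
    have hfun : (fun (lst : List String) (i : Int) =>
        if i = 0 ∨ i = n - 1 then
          lst ++ [String.ofList (PySem.List.pyRepeat ['*'] n)]
        else
          lst ++ [String.ofList (['*'] ++ PySem.List.pyRepeat [' '] (n - 2) ++ ['*'])])
        = fun lst i => lst ++ [if i = 0 ∨ i = n - 1 then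
            String.ofList (PySem.List.pyRepeat ['*'] n)
          else String.ofList (['*'] ++ PySem.List.pyRepeat [' '] (n - 2) ++ ['*'])] := by
      funext lst i; split_ifs <;> rfl
    rw [hfun, PySem.List.foldl_append_singleton_eq_map, List.nil_append]
    -- B's grid as replicate + set
    rw [List.map_const', PySem.List.length_pyRange_one,
        PySem.List.pySetD_of_nonneg _ _ (by omega : (0:Int) ≤ 0),
        PySem.List.pySetD_of_nonneg _ _ (by omega : (0:Int) ≤ n - 1),
        List.map_set, List.map_set, List.map_set, List.map_set]
    rw [painted_stars_eq n hn]
    apply List.ext_getElem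
    · simp [PySem.List.length_pyRange_one]
    · intro k hk1 hk2
      have hklen : k < n.toNat := by
        simpa [PySem.List.length_pyRange_one] using hk1
      rw [List.getElem_map, PySem.List.getElem_pyRange_one, List.getElem_set, List.getElem_set]
      have h0t : (0 : Int).toNat = 0 := rfl
      by_cases hk0 : k = 0
      · have : (0:Int) + (k:Int) = 0 := by omega
        simp [hk0, this]
      · by_cases hklast : k = n.toNat - 1
        · have hi : (0:Int) + (k:Int) = n - 1 := by omega
          have ht : (n - 1).toNat = k := by omega
          simp [hi, ht, hk0]
        · have hni : ¬ ((0:Int) + (k:Int) = 0 ∨ (0:Int) + (k:Int) = n - 1) := by omega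
          have ht0 : ¬ ((0:Int).toNat = k) := by omega
          have htl : ¬ ((n - 1).toNat = k) := by omega
          have hn2 : 2 ≤ n := by omega
          simp only [if_neg hni, if_neg ht0, if_neg htl, List.map_replicate, List.getElem_replicate]
          rw [painted_row_eq n hn2]

-- ===== VERDICT =====
theorem generate_hollow_square_spec : Claim_equal_generate_hollow_square := by
  intro n _
  exact generate_hollow_square_eq_alt n
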